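-- pv_equiv track=rewrite | github.com/ibrahimfe/small_project | kodenesia/penjumlahan_yang_dibatalkan.py | false_sum
-- ===== SOURCE A (Python) =====
-- def false_sum(string):
--     text = string.split()
--     total, temp = 0, 0
--     for kaka in text:
--         if kaka != "B":
--             temp = int(kaka)
--             total += temp
--         if kaka == "B":
--             total -= temp
--     return total
-- ===== SOURCE B (Python) =====
-- def false_sum(string):
--     tokens = string.split()
--     n = len(tokens)
--     total = 0
--     i = 0
--     while i < n:
--         tok = tokens[i]
--         if tok == "B":
--             # a 'B' with no preceding number cancels nothing
--             i += 1
--             continue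
--         value = int(tok)
--         j = i + 1
--         while j < n and tokens[j] == "B":
--             j += 1
--         # the number followed by k consecutive 'B's contributes value*(1-k)
--         total += value * (1 - (j - i - 1))
--         i = j
--     return total
-- ===== Notes on version B (the rewrite author's own statement) =====
-- stated objective: alternative
-- what changed: Replaces the running 'temp' fold with an index scan that parses each number and looks ahead over its run of consecutive 'B' tokens, adding value*(1-run length) in one step.
import Mathlib
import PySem

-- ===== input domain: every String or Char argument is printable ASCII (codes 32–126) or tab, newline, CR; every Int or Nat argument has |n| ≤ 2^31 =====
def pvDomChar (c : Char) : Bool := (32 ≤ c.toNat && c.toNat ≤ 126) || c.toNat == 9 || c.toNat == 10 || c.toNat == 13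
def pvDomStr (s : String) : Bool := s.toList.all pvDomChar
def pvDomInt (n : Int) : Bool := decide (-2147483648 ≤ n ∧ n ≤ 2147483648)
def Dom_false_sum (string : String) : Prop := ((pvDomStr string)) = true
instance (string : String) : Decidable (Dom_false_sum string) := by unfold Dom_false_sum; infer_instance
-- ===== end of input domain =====

-- B replaces A's running-'temp' fold by an index scan that groups each number with its
-- trailing run of 'B' tokens (alternative decomposition, same cost); proved equal wherever A returns.


-- ===== PORT A =====
-- A's loop: running total and 'temp' = last parsed number (int(kaka) ported as
-- (PySem.Int.ofStr? kaka).getD 0; under Pre_ the parse always succeeds, so getD is exact).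
def falseSumStep (acc : Int × Int) (kaka : String) : Int × Int :=
  let (total, temp) := acc
  let (total, temp) := if kaka ≠ "B" then (total + (PySem.Int.ofStr? kaka).getD 0, (PySem.Int.ofStr? kaka).getD 0) else (total, temp)
  let total := if kaka == "B" then total - temp else total
  (total, temp)

def false_sum (string : String) : Int :=
  ((PySem.Str.split₀ string).foldl falseSumStep (0, 0)).1

-- ===== PORT B =====
-- leading count of "B" tokens (B's inner while loop)
def leadB : List String → Nat
  | [] => 0
  | t :: rest => if t = "B" then leadB rest + 1 else 0

-- B's outer index loop as structural recursion over the token list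
def falseSumGo : List String → Int
  | [] => 0
  | t :: rest =>
    if t = "B" then falseSumGo rest
    else
      let v := (PySem.Int.ofStr? t).getD 0
      let k := leadB rest
      v * (1 - (k : Int)) + falseSumGo (rest.drop k)
termination_by ts => ts.length
decreasing_by
  all_goals simp only [List.length_cons, List.length_drop]
  all_goals omega

def false_sum_alt (string : String) : Int :=
  falseSumGo (PySem.Str.split₀ string)

-- ===== PRECONDITION & SPEC =====
-- Pre_ excludes exactly the inputs on which A raises ValueError: a whitespace-separated
-- token other than "B" that is not a valid int literal (B raises there too).
def Pre_false_sum (string : String) : Prop :=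
  ∀ tok ∈ PySem.Str.split₀ string, tok = "B" ∨ (PySem.Int.ofStr? tok).isSome
instance (string : String) : Decidable (Pre_false_sum string) := by unfold Pre_false_sum; infer_instance
def pvWitness_false_sum : String := "1 B 2 3 B B"

def Spec_false_sum (string : String) (out : Int) : Prop := out = false_sum_alt string
instance (string : String) (out : Int) : Decidable (Spec_false_sum string out) := by unfold Spec_false_sum; infer_instance

-- ===== CLAIM =====
def Claim_equal_false_sum : Prop := ∀ (string : String), Dom_false_sum string → Pre_false_sum string → Spec_false_sum string (false_sum string)

-- ===== LEMMAS AND PROOFS =====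

-- B's skipping of unmatched 'B' tokens one at a time equals dropping the whole leading run
theorem falseSumGo_skipB (ts : List String) :
    falseSumGo ts = falseSumGo (ts.drop (leadB ts)) := by
  induction ts with
  | nil => simp [leadB]
  | cons t rest ih =>
    by_cases ht : t = "B"
    · simp [falseSumGo, leadB, ht, ih]
    · simp [leadB, ht]

-- Main invariant: the first component of A's fold from any (total, temp) state.
theorem fold_eq (ts : List String) : ∀ (total temp : Int),
    ((ts.foldl falseSumStep (total, temp)).1
      = total - temp * (leadB ts : Int) + falseSumGo (ts.drop (leadB ts))) := by
  induction ts with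
  | nil => intro total temp; simp [leadB, falseSumGo]
  | cons t rest ih =>
    intro total temp
    by_cases ht : t = "B"
    · subst ht
      have hstep : falseSumStep (total, temp) "B" = (total - temp, temp) := by
        simp [falseSumStep]
      simp only [List.foldl_cons, hstep]
      rw [ih]
      simp only [leadB, if_true, List.drop_succ_cons]
      push_cast; ring
    · have hstep : falseSumStep (total, temp) t
          = (total + (PySem.Int.ofStr? t).getD 0, (PySem.Int.ofStr? t).getD 0) := by
        simp [falseSumStep, ht]
      simp only [List.foldl_cons, hstep]
      rw [ih]
      simp only [leadB, if_neg ht, List.drop_zero, Nat.cast_zero]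
      rw [show falseSumGo (t :: rest)
            = (PySem.Int.ofStr? t).getD 0 * (1 - (leadB rest : Int)) + falseSumGo (rest.drop (leadB rest))
          from by simp [falseSumGo, ht]]
      ring

-- ===== VERDICT =====
theorem false_sum_spec : Claim_equal_false_sum := by
  intro s _ _
  unfold Spec_false_sum false_sum false_sum_alt
  rw [fold_eq]
  rw [← falseSumGo_skipB]
  ring
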